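-- pv_equiv track=rewrite | github.com/innewiadro/Codewars | kata_level7/Changable_diagonal/Changable_diagonal.py | matrix_diagonal
-- ===== SOURCE A (Python) =====
-- def matrix_diagonal(matrix, value):
--     n = len(matrix)
--     trace_sum = 0
--
--     if value >= 0:
--         for i in range(n - value):
--             trace_sum += matrix[i + value][i]
--     else:
--         for i in range(n + value):
--             trace_sum += matrix[i][i - value]
--
--     return trace_sum
-- ===== SOURCE B (Python) =====
-- def matrix_diagonal(matrix, value):
--     # Full n x n scan accumulating the cells on the shifted diagonal (row - col == value).
--     n = len(matrix)
--     total = 0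
--     for r in range(n):
--         for c in range(n):
--             if r - c == value:
--                 total += matrix[r][c]
--     return total
-- ===== Notes on version B (the rewrite author's own statement) =====
-- stated objective: alternative
-- what changed: Replaces A's two value-sign branches that walk the shifted diagonal directly with a single branch-free nested scan over the whole n x n index grid, accumulating the cells where row - col == value.
import Mathlib
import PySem

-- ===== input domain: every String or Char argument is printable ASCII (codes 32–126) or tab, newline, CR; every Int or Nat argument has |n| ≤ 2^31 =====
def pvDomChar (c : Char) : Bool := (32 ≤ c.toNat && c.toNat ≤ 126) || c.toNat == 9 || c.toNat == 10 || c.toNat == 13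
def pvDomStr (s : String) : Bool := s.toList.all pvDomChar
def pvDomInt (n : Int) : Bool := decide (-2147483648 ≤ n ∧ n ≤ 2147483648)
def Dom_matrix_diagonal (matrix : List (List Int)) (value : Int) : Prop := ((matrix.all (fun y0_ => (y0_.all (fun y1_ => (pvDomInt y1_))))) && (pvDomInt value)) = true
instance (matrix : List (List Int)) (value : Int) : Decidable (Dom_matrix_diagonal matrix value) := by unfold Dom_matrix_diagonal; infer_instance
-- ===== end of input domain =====

-- B replaces A's two sign branches walking the shifted diagonal with one nested scan of the
-- full n x n index grid that accumulates cells where row - col == value (alternative, same results).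


-- ===== PORT A =====
def matrix_diagonal (matrix : List (List Int)) (value : Int) : Int :=
  let n : Int := matrix.length
  if value ≥ 0 then
    (PySem.List.pyRange 0 (n - value) 1).foldl
      (fun s i => s + PySem.List.pyGetD (PySem.List.pyGetD matrix (i + value) []) i 0) 0
  else
    (PySem.List.pyRange 0 (n + value) 1).foldl
      (fun s i => s + PySem.List.pyGetD (PySem.List.pyGetD matrix i []) (i - value) 0) 0

-- ===== PORT B =====
def matrix_diagonal_alt (matrix : List (List Int)) (value : Int) : Int :=
  let n : Int := matrix.length
  (PySem.List.pyRange 0 n 1).foldl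
    (fun s r =>
      (PySem.List.pyRange 0 n 1).foldl
        (fun s2 c =>
          if r - c = value then s2 + PySem.List.pyGetD (PySem.List.pyGetD matrix r []) c 0
          else s2) s) 0

-- ===== PRECONDITION & SPEC =====
-- Pre_ excludes exactly the inputs on which Python A raises IndexError: a diagonal cell
-- (r, c) with r - c = value, r < n, c < n whose row is shorter than c+1.
def Pre_matrix_diagonal (matrix : List (List Int)) (value : Int) : Prop :=
  ∀ (r c : Fin matrix.length), (r.1 : Int) - (c.1 : Int) = value → c.1 < (matrix.get r).length
instance (matrix : List (List Int)) (value : Int) : Decidable (Pre_matrix_diagonal matrix value) := by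
  unfold Pre_matrix_diagonal; infer_instance
def pvWitness_matrix_diagonal : List (List Int) × Int := ([[1, 2], [3, 4]], 1)

def Spec_matrix_diagonal (matrix : List (List Int)) (value : Int) (out : Int) : Prop := out = matrix_diagonal_alt matrix value
instance (matrix : List (List Int)) (value : Int) (out : Int) : Decidable (Spec_matrix_diagonal matrix value out) := by unfold Spec_matrix_diagonal; infer_instance

-- ===== CLAIM (what is proved, stated in full; the proofs are below) =====
def Claim_equal_matrix_diagonal : Prop := ∀ (matrix : List (List Int)) (value : Int), Dom_matrix_diagonal matrix value → Pre_matrix_diagonal matrix value → Spec_matrix_diagonal matrix value (matrix_diagonal matrix value)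

-- ===== LEMMAS AND PROOFS =====

/-- The cell read by both ports. -/
def pvCell (matrix : List (List Int)) (r c : Int) : Int :=
  PySem.List.pyGetD (PySem.List.pyGetD matrix r []) c 0

/-- The inner scan over c ∈ [a, n) adds the single matching cell (c = r - value), if in range. -/
lemma pv_inner_loop (matrix : List (List Int)) (value r : Int) :
    ∀ (m : Nat) (a s : Int), a + m = (matrix.length : Int) →
      (PySem.List.pyRange a matrix.length 1).foldl
          (fun s2 c => if r - c = value then s2 + pvCell matrix r c else s2) s
        = s + (if a ≤ r - value ∧ r - value < (matrix.length : Int)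
               then pvCell matrix r (r - value) else 0) := by
  intro m
  induction m with
  | zero =>
      intro a s ha
      rw [PySem.List.pyRange_one_eq_nil (by omega)]
      simp only [List.foldl_nil]
      rw [if_neg (by omega)]
      ring
  | succ k ih =>
      intro a s ha
      rw [PySem.List.pyRange_one_cons (by omega)]
      simp only [List.foldl_cons]
      rw [ih (a + 1) _ (by omega)]
      by_cases h : r - a = value
      · rw [if_pos h, if_neg (by omega), if_pos (by omega)]
        have : r - value = a := by omega
        rw [this]; ring
      · rw [if_neg h]
        by_cases h2 : a + 1 ≤ r - value ∧ r - value < (matrix.length : Int)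
        · rw [if_pos h2, if_pos (by omega)]
        · rw [if_neg h2, if_neg (by omega)]

/-- Per-row contribution of B's outer scan. -/
def pvRowH (matrix : List (List Int)) (value r : Int) : Int :=
  if 0 ≤ r - value ∧ r - value < (matrix.length : Int) then pvCell matrix r (r - value) else 0

lemma pv_alt_sum (matrix : List (List Int)) (value : Int) :
    matrix_diagonal_alt matrix value
      = ((PySem.List.pyRange 0 matrix.length 1).map (pvRowH matrix value)).sum := by
  unfold matrix_diagonal_alt
  have hcongr :
      (PySem.List.pyRange 0 (matrix.length : Int) 1).foldl
        (fun s r =>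
          (PySem.List.pyRange 0 (matrix.length : Int) 1).foldl
            (fun s2 c => if r - c = value then s2 + PySem.List.pyGetD (PySem.List.pyGetD matrix r []) c 0 else s2) s) 0
      = (PySem.List.pyRange 0 (matrix.length : Int) 1).foldl
        (fun s r => s + pvRowH matrix value r) 0 := by
    apply PySem.List.foldl_congr_mem
    intro acc r _
    have := pv_inner_loop matrix value r matrix.length 0 acc (by omega)
    simpa [pvCell, pvRowH] using this
  rw [hcongr, PySem.List.foldl_add]
  simp

/-- Sum over k < m of the B-row terms with value ≥ 0 equals A's diagonal walk sum. -/
lemma pv_sum_nonneg (matrix : List (List Int)) (value : Int) (hv : 0 ≤ value) :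
    ∀ m : Nat, m ≤ matrix.length →
      ((List.range m).map (fun (k : Nat) => pvRowH matrix value (k : Int))).sum
        = ((List.range (((m : Int) - value).toNat)).map
            (fun (k : Nat) => pvCell matrix ((k : Int) + value) (k : Int))).sum := by
  intro m
  induction m with
  | zero =>
      have h0 : (-value).toNat = 0 := by omega
      simp [h0]
  | succ k ih =>
      intro hk
      rw [List.range_succ, List.map_append, List.sum_append]
      rw [ih (by omega)]
      push_cast
      by_cases h : value ≤ (k : Int)
      · have h1 : (((k : Int) + 1 - value).toNat) = ((k : Int) - value).toNat + 1 := by omega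
        rw [h1, List.range_succ, List.map_append, List.sum_append]
        have h2 : ((((k : Int) - value).toNat : Int) + value) = (k : Int) := by omega
        have h3 : (((k : Int) - value).toNat : Int) = (k : Int) - value := by omega
        simp only [List.map_cons, List.map_nil, List.sum_cons, List.sum_nil, h2]
        unfold pvRowH
        rw [if_pos ⟨by omega, by omega⟩, h3]
      · have h1 : (((k : Int) + 1 - value).toNat) = (((k : Int) - value).toNat) := by omega
        rw [h1]
        simp only [List.map_cons, List.map_nil, List.sum_cons, List.sum_nil]
        unfold pvRowH
        rw [if_neg (by omega)]
        ring
  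
/-- Sum over k < m of the B-row terms with value < 0 equals A's diagonal walk sum. -/
lemma pv_sum_neg (matrix : List (List Int)) (value : Int) (hv : value < 0) :
    ∀ m : Nat, m ≤ matrix.length →
      ((List.range m).map (fun (k : Nat) => pvRowH matrix value (k : Int))).sum
        = ((List.range (min m (((matrix.length : Int) + value).toNat))).map
            (fun (k : Nat) => pvCell matrix (k : Int) ((k : Int) - value))).sum := by
  intro m
  induction m with
  | zero => simp
  | succ k ih =>
      intro hk
      rw [List.range_succ, List.map_append, List.sum_append]
      rw [ih (by omega)]
      by_cases h : (k : Int) - value < (matrix.length : Int)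
      · have h1 : min (k + 1) (((matrix.length : Int) + value).toNat)
            = min k (((matrix.length : Int) + value).toNat) + 1 := by omega
        have h2 : min k (((matrix.length : Int) + value).toNat) = k := by omega
        rw [h1, h2, List.range_succ, List.map_append, List.sum_append]
        simp only [List.map_cons, List.map_nil, List.sum_cons, List.sum_nil]
        unfold pvRowH
        rw [if_pos ⟨by omega, h⟩]
      · have h1 : min (k + 1) (((matrix.length : Int) + value).toNat)
            = min k (((matrix.length : Int) + value).toNat) := by omega
        rw [h1]
        simp only [List.map_cons, List.map_nil, List.sum_cons, List.sum_nil]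
        unfold pvRowH
        rw [if_neg (by omega)]
        ring

-- ===== VERDICT (by name: the statement is the Claim_ definition above) =====
theorem matrix_diagonal_spec : Claim_equal_matrix_diagonal := by
  intro matrix value _dom _pre
  unfold Spec_matrix_diagonal
  rw [pv_alt_sum]
  rw [PySem.List.pyRange_one]
  unfold matrix_diagonal
  by_cases hv : value ≥ 0
  · rw [if_pos hv, PySem.List.foldl_add, PySem.List.pyRange_one]
    simp only [List.map_map, Function.comp_def, sub_zero, zero_add, Int.toNat_natCast]
    rw [pv_sum_nonneg matrix value hv matrix.length (le_refl _)]
    rfl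
  · rw [if_neg hv, PySem.List.foldl_add, PySem.List.pyRange_one]
    simp only [List.map_map, Function.comp_def, sub_zero, zero_add, Int.toNat_natCast]
    rw [pv_sum_neg matrix value (by omega) matrix.length (le_refl _)]
    have hmin : min matrix.length (((matrix.length : Int) + value).toNat) = ((matrix.length : Int) + value).toNat := by omega
    rw [hmin]
    rfl
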